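-- pv_equiv track=rewrite | github.com/Oxmose/DomoHome | WebServer/EnvMonitor.py | isComment
-- ===== SOURCE A (Python) =====
-- def isComment(str):
--     for i in range(len(str)):
--         if str[i] == ' ':
--             continue
--         if str[i] == '#':
--             return True
--         else:
--             return False
--
--     return True
-- ===== SOURCE B (Python) =====
-- def isComment(str):
--     i = str.find('#')
--     if i == -1:
--         return str == ' ' * len(str)
--     return str[:i] == ' ' * i
-- ===== Notes on version B (the rewrite author's own statement) =====
-- stated objective: alternative
-- what changed: Instead of scanning for the first non-space character, B locates the first '#' with str.find and decides by comparing the prefix before it (or the whole string if none) against a run of spaces.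
import Mathlib
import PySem

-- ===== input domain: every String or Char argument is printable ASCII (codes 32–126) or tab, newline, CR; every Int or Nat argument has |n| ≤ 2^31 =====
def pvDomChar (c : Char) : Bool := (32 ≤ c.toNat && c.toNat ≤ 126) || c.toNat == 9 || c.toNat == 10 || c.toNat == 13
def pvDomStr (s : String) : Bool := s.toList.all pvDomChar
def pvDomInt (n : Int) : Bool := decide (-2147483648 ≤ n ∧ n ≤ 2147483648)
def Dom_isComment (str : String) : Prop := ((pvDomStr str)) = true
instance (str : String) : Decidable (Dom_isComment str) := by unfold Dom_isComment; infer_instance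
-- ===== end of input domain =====

-- B locates the first '#' (str.find) and compares the prefix before it against a run of spaces; return values only.
-- ===== PORT A =====
-- the for-loop over indices: skip ' ', return (c == '#') at the first other char, True when the loop ends
def isCommentLoop : List Char → Bool
  | [] => true
  | c :: rest => if c = ' ' then isCommentLoop rest else (if c = '#' then true else false)

def isComment (str : String) : Bool := isCommentLoop str.toList

-- ===== PORT B =====
-- i = str.find('#')  → PySem.List.index? (none ↔ -1, exact for a single-char needle);
-- str[:i] with 0 ≤ i  → List.take i;  ' ' * i  → List.replicate i ' '
def isComment_alt (str : String) : Bool :=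
  let l := str.toList
  match PySem.List.index? l '#' with
  | none => l == List.replicate l.length ' '
  | some i => l.take i == List.replicate i ' '

-- ===== PRECONDITION & SPEC =====
def Spec_isComment (str : String) (out : Bool) : Prop := out = isComment_alt str
instance (str : String) (out : Bool) : Decidable (Spec_isComment str out) := by unfold Spec_isComment; infer_instance

-- ===== CLAIM (what is proved, stated in full; the proofs are below) =====
def Claim_equal_isComment : Prop := ∀ (str : String), Dom_isComment str → Spec_isComment str (isComment str)

-- ===== LEMMAS AND PROOFS =====

lemma loop_eq_alt (l : List Char) :
    isCommentLoop l = (match PySem.List.index? l '#' with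
      | none => l == List.replicate l.length ' '
      | some i => l.take i == List.replicate i ' ') := by
  induction l with
  | nil => rfl
  | cons c rest ih =>
    by_cases hh : c = '#'
    · subst hh
      rw [PySem.List.index?_cons_self]
      simp [isCommentLoop]
    · rw [PySem.List.index?_cons_of_ne rest hh]
      by_cases hs : c = ' '
      · subst hs
        rw [isCommentLoop, if_pos rfl, ih]
        cases hidx : PySem.List.index? rest '#' with
        | none => simp [List.replicate_succ]
        | some i => simp [List.replicate_succ]
      · rw [isCommentLoop, if_neg hs, if_neg hh]
        cases hidx : PySem.List.index? rest '#' with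
        | none => simp [List.replicate_succ, fun h => hs h]
        | some i => simp [List.replicate_succ, fun h => hs h]

-- ===== VERDICT (by name: the statement is the Claim_ definition above) =====
theorem isComment_spec : Claim_equal_isComment := by
  intro s _
  unfold Spec_isComment isComment isComment_alt
  exact loop_eq_alt s.toList
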